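-- pv_equiv track=rewrite | github.com/Flavoris/Genomancer-App | planner.py | reading_frame_ok
-- ===== SOURCE A (Python) =====
-- def reading_frame_ok(seq_left: str, seq_right: str, scar: str,
--                     frame_left: int = 0, frame_right: int = 0) -> bool:
--     """
--     Check if a junction preserves reading frame.
--
--     Args:
--         seq_left: Left sequence (last few codons)
--         seq_right: Right sequence (first few codons)
--         scar: Scar sequence at junction
--         frame_left: Reading frame of left sequence (0, 1, or 2)
--         frame_right: Reading frame of right sequence (0, 1, or 2)
--
--     Returns:
--         True if frame is preserved
--     """
--     # Calculate junction length
--     junction_len = len(scar)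
--
--     # Check if junction length preserves frame
--     # frame_left + junction_len + frame_right should be divisible by 3
--     total_offset = (frame_left + junction_len) % 3
--
--     if total_offset != frame_right:
--         return False
--
--     # Check for stop codons in junction context
--     stop_codons = {'TAA', 'TAG', 'TGA'}
--
--     # Build junction context (last codon of left + scar + first codon of right)
--     context = seq_left[-3:] + scar + seq_right[:3]
--
--     # Check for stop codons
--     for i in range(0, len(context) - 2):
--         codon = context[i:i+3].upper()
--         if len(codon) == 3 and codon in stop_codons:
--             return False
--
--     return True
-- ===== SOURCE B (Python) =====
-- def reading_frame_ok(seq_left: str, seq_right: str, scar: str,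
--                      frame_left: int = 0, frame_right: int = 0) -> bool:
--     # frame-parity guard (same as the original)
--     if (frame_left + len(scar)) % 3 != frame_right:
--         return False
--     # uppercase the junction context once, then test the three stop-codon
--     # patterns by substring containment instead of scanning every position
--     ctx = (seq_left[-3:] + scar + seq_right[:3]).upper()
--     return not any(s in ctx for s in ('TAA', 'TAG', 'TGA'))
-- ===== Notes on version B (the rewrite author's own statement) =====
-- stated objective: idiomatic
-- what changed: Replaced the explicit index loop that uppercases each triplet and tests it against a set with one uppercasing of the whole context followed by substring-containment tests for the three stop-codon patterns.
import Mathlib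
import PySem

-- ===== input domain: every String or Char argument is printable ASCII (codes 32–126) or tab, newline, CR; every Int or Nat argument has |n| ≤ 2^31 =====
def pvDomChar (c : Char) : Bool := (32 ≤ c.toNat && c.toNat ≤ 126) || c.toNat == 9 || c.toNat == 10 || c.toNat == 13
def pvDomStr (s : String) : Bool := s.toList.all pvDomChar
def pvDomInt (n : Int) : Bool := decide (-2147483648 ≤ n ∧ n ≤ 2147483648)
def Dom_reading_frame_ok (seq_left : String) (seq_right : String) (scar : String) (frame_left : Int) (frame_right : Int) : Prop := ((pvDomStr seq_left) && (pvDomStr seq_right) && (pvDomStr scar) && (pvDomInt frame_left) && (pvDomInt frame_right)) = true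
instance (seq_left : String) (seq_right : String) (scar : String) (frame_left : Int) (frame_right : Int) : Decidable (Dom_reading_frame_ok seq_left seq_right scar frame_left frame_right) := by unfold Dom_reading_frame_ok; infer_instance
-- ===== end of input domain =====

-- B uppercases the junction context once and tests the three stop-codon patterns by
-- substring containment, instead of A's index loop that uppercases every triplet
-- and tests it against a set (idiomatic decomposition; same asymptotic cost).


-- ===== PORT A =====
-- stop_codons = {'TAA', 'TAG', 'TGA'}
def pvStopsA : PySem.Set (List Char) :=
  PySem.Set.ofList ["TAA".toList, "TAG".toList, "TGA".toList]

-- the 'for i in range(...): codon = context[i:i+3].upper(); if … return False' loop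
def pvScanA (context : List Char) : List Int → Bool
  | [] => true
  | i :: rest =>
      let codon := PySem.Chars.upper (PySem.List.slice context (some i) (some (i + 3)))
      if codon.length == 3 && pvStopsA.contains codon then false
      else pvScanA context rest

def reading_frame_ok (seq_left : String) (seq_right : String) (scar : String) (frame_left : Int) (frame_right : Int) : Bool :=
  let junction_len : Int := PySem.Str.len scar
  let total_offset := PySem.Int.mod (frame_left + junction_len) 3
  if total_offset ≠ frame_right then false
  else
    let context := PySem.List.slice seq_left.toList (some (-3)) none
      ++ scar.toList ++ PySem.List.slice seq_right.toList none (some 3)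
    pvScanA context (PySem.List.pyRange 0 ((context.length : Int) - 2) 1)

-- ===== PORT B =====
def pvStopPats : List (List Char) := ["TAA".toList, "TAG".toList, "TGA".toList]

def reading_frame_ok_alt (seq_left : String) (seq_right : String) (scar : String) (frame_left : Int) (frame_right : Int) : Bool :=
  if PySem.Int.mod (frame_left + PySem.Str.len scar) 3 ≠ frame_right then false
  else
    let ctx := PySem.Chars.upper (PySem.List.slice seq_left.toList (some (-3)) none
      ++ scar.toList ++ PySem.List.slice seq_right.toList none (some 3))
    ! pvStopPats.any (fun s => PySem.Chars.isIn s ctx)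

-- ===== PRECONDITION & SPEC =====
def Spec_reading_frame_ok (seq_left : String) (seq_right : String) (scar : String) (frame_left : Int) (frame_right : Int) (out : Bool) : Prop := out = reading_frame_ok_alt seq_left seq_right scar frame_left frame_right
instance (seq_left : String) (seq_right : String) (scar : String) (frame_left : Int) (frame_right : Int) (out : Bool) : Decidable (Spec_reading_frame_ok seq_left seq_right scar frame_left frame_right out) := by unfold Spec_reading_frame_ok; infer_instance

-- ===== CLAIM (what is proved, stated in full; the proofs are below) =====
def Claim_equal_reading_frame_ok : Prop := ∀ (seq_left : String) (seq_right : String) (scar : String) (frame_left : Int) (frame_right : Int), Dom_reading_frame_ok seq_left seq_right scar frame_left frame_right → Spec_reading_frame_ok seq_left seq_right scar frame_left frame_right (reading_frame_ok seq_left seq_right scar frame_left frame_right)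

-- ===== LEMMAS AND PROOFS =====

-- A's per-position condition, named for the proofs
def pvCondA (context : List Char) (i : Int) : Bool :=
  let codon := PySem.Chars.upper (PySem.List.slice context (some i) (some (i + 3)))
  codon.length == 3 && pvStopsA.contains codon

theorem pvScanA_eq_not_any (context : List Char) (l : List Int) :
    pvScanA context l = ! l.any (pvCondA context) := by
  induction l with
  | nil => rfl
  | cons i rest ih =>
    show (if pvCondA context i then false else pvScanA context rest) = _
    by_cases h : pvCondA context i <;> simp [h, ih]

theorem pvUpper_map (l : List Char) :
    PySem.Chars.upper l = l.map PySem.Chars.upperChar := rfl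

-- the heart: scanning every position for an uppercased stop triplet
-- equals testing each stop pattern for containment in the uppercased context
theorem pvScan_eq_contains (ctx : List Char) :
    pvScanA ctx (PySem.List.pyRange 0 ((ctx.length : Int) - 2) 1)
      = ! pvStopPats.any (fun s => PySem.Chars.isIn s (PySem.Chars.upper ctx)) := by
  rw [pvScanA_eq_not_any]
  congr 1
  rw [Bool.eq_iff_iff]
  simp only [List.any_eq_true]
  constructor
  · rintro ⟨i, hi, hc⟩
    rw [PySem.List.mem_pyRange_one] at hi
    obtain ⟨hi0, hilt⟩ := hi
    have h3 : (i + 3).toNat - i.toNat = 3 := by omega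
    unfold pvCondA at hc
    rw [PySem.List.slice_toNat ctx hi0 (by omega), h3] at hc
    simp only [Bool.and_eq_true, beq_iff_eq] at hc
    obtain ⟨hlen, hmem⟩ := hc
    set codon := PySem.Chars.upper (List.take 3 (List.drop i.toNat ctx)) with hcod
    refine ⟨codon, ?_, ?_⟩
    · have := PySem.Set.contains_iff pvStopsA codon |>.mp hmem
      simpa [pvStopsA, pvStopPats, PySem.Set.ofList] using this
    · rw [← PySem.Chars.exists_prefix_drop_iff_isIn]
      refine ⟨i.toNat, ?_⟩
      have : codon = List.take 3 (List.drop i.toNat (PySem.Chars.upper ctx)) := by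
        simp [hcod, pvUpper_map, List.map_take, List.map_drop]
      rw [this]
      exact List.take_prefix _ _
  · rintro ⟨s, hs, hin⟩
    rw [← PySem.Chars.exists_prefix_drop_iff_isIn] at hin
    obtain ⟨j, hpre⟩ := hin
    have hslen : s.length = 3 := by
      simp only [pvStopPats, List.mem_cons] at hs
      rcases hs with h | h | h | h <;> first | (subst h; decide) | exact absurd h (by simp)
    have hle : 3 ≤ (PySem.Chars.upper ctx).length - j := by
      have := hpre.length_le
      rw [List.length_drop, hslen] at this
      omega
    have hUlen : (PySem.Chars.upper ctx).length = ctx.length := by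
      simp [pvUpper_map]
    refine ⟨(j : Int), ?_, ?_⟩
    · rw [PySem.List.mem_pyRange_one]
      constructor
      · exact Int.natCast_nonneg j
      · omega
    · unfold pvCondA
      rw [PySem.List.slice_toNat ctx (Int.natCast_nonneg j) (by omega)]
      have h3 : ((j : Int) + 3).toNat - ((j : Int)).toNat = 3 := by omega
      rw [h3, Int.toNat_natCast]
      have hseq : PySem.Chars.upper (List.take 3 (List.drop j ctx)) = s := by
        have h1 := List.prefix_iff_eq_take.mp hpre
        rw [hslen] at h1
        rw [h1]
        simp [pvUpper_map, List.map_take, List.map_drop]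
      rw [hseq]
      simp only [Bool.and_eq_true, beq_iff_eq]
      refine ⟨hslen, ?_⟩
      rw [PySem.Set.contains_iff]
      simpa [pvStopsA, pvStopPats, PySem.Set.ofList] using hs

-- ===== VERDICT (by name: the statement is the Claim_ definition above) =====
theorem reading_frame_ok_spec : Claim_equal_reading_frame_ok := by
  intro seq_left seq_right scar frame_left frame_right _
  unfold Spec_reading_frame_ok
  simp only [reading_frame_ok, reading_frame_ok_alt]
  by_cases h : PySem.Int.mod (frame_left + PySem.Str.len scar) 3 ≠ frame_right
  · rw [if_pos h, if_pos h]
  · rw [if_neg h, if_neg h]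
    exact pvScan_eq_contains _
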